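-- pv_equiv track=rewrite | github.com/michael-jopiti/MyMeteo | src/utils/dwnl_train_data.py | pick_hourly_historical_asset
-- ===== SOURCE A (Python) =====
-- from typing import Dict, List, Optional, Tuple
--
-- def pick_hourly_historical_asset(assets: Dict):
--     """Relaxed: pick any historical CSV/Parquet asset (these contain hourly series)."""
--     for k, a in assets.items():
--         href = (a.get("href") or "").strip()
--         if not href:
--             continue
--         if ("historical" in href) and (href.endswith(".csv") or href.endswith(".parquet")):
--             return (k, a)
--     # fallback: any CSV/Parquet if no "historical" mention
--     for k, a in assets.items():
--         href = (a.get("href") or "").strip()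
--         if href.endswith(".csv") or href.endswith(".parquet"):
--             return (k, a)
--     return None
-- ===== SOURCE B (Python) =====
-- def pick_hourly_historical_asset(assets):
--     """Single pass: return first historical CSV/Parquet immediately; remember first plain CSV/Parquet as fallback."""
--     fallback = None
--     for k, a in assets.items():
--         href = (a.get("href") or "").strip()
--         if not href:
--             continue
--         is_data = href.endswith(".csv") or href.endswith(".parquet")
--         if is_data and ("historical" in href):
--             return (k, a)
--         if is_data and fallback is None:
--             fallback = (k, a)
--     return fallback
-- ===== Notes on version B (the rewrite author's own statement) =====
-- stated objective: simpler
-- what changed: Replaces A's two sequential scans (historical pass, then fallback pass) by one single pass that returns a historical CSV/Parquet immediately and records the first plain CSV/Parquet as a fallback accumulator.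
import Mathlib
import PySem

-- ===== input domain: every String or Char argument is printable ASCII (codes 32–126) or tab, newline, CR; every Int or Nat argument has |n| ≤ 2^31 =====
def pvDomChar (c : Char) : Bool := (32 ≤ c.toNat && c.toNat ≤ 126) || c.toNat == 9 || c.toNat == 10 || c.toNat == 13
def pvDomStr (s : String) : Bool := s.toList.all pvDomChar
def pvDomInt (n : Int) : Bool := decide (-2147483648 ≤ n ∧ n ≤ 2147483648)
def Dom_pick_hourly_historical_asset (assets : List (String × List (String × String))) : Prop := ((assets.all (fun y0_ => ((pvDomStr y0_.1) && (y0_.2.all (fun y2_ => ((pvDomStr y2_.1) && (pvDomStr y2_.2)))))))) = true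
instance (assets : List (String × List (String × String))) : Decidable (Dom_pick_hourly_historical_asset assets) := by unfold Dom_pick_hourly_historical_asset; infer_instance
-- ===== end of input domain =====

-- B fuses A's two sequential scans into one pass with a fallback accumulator (objective: simpler).

-- ===== PORT A =====
-- first loop of A: first asset whose stripped href is nonempty, mentions "historical" and ends in .csv/.parquet
def pvALoop1 : List (String × List (String × String)) → Option (String × (List (String × String)))
  | [] => none
  | (k, a) :: rest =>
    let href := PySem.Str.strip (PySem.Dict.getD (PySem.Dict.mk a) "href" "")
    if href = "" then pvALoop1 rest
    else if PySem.Str.isIn "historical" href &&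
            (PySem.Str.endswith href ".csv" || PySem.Str.endswith href ".parquet") then some (k, a)
    else pvALoop1 rest

-- second loop of A: first asset whose stripped href ends in .csv/.parquet
def pvALoop2 : List (String × List (String × String)) → Option (String × (List (String × String)))
  | [] => none
  | (k, a) :: rest =>
    let href := PySem.Str.strip (PySem.Dict.getD (PySem.Dict.mk a) "href" "")
    if PySem.Str.endswith href ".csv" || PySem.Str.endswith href ".parquet" then some (k, a)
    else pvALoop2 rest

def pick_hourly_historical_asset (assets : List (String × List (String × String))) : Option (String × (List (String × String))) :=
  match pvALoop1 assets with
  | some r => some r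
  | none => pvALoop2 assets

-- ===== PORT B =====
-- single pass: immediate return on historical data asset, first plain data asset kept in fb
def pvBLoop : List (String × List (String × String)) → Option (String × (List (String × String))) → Option (String × (List (String × String)))
  | [], fb => fb
  | (k, a) :: rest, fb =>
    let href := PySem.Str.strip (PySem.Dict.getD (PySem.Dict.mk a) "href" "")
    if href = "" then pvBLoop rest fb
    else
      let isData := PySem.Str.endswith href ".csv" || PySem.Str.endswith href ".parquet"
      if isData && PySem.Str.isIn "historical" href then some (k, a)
      else if isData && fb.isNone then pvBLoop rest (some (k, a))
      else pvBLoop rest fb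

def pick_hourly_historical_asset_alt (assets : List (String × List (String × String))) : Option (String × (List (String × String))) :=
  pvBLoop assets none

-- ===== PRECONDITION & SPEC =====
def Spec_pick_hourly_historical_asset (assets : List (String × List (String × String))) (out : Option (String × (List (String × String)))) : Prop := out = pick_hourly_historical_asset_alt assets
instance (assets : List (String × List (String × String))) (out : Option (String × (List (String × String)))) : Decidable (Spec_pick_hourly_historical_asset assets out) := by unfold Spec_pick_hourly_historical_asset; infer_instance

-- ===== CLAIM (what is proved, stated in full; the proofs are below) =====
def Claim_equal_pick_hourly_historical_asset : Prop := ∀ (assets : List (String × List (String × String))), Dom_pick_hourly_historical_asset assets → Spec_pick_hourly_historical_asset assets (pick_hourly_historical_asset assets)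

-- ===== LEMMAS AND PROOFS =====

-- the key invariant: B's loop computes A's first loop, else the fallback, else A's second loop
theorem pvBLoop_eq (l : List (String × List (String × String)))
    (fb : Option (String × (List (String × String)))) :
    pvBLoop l fb = ((pvALoop1 l).or (fb.or (pvALoop2 l))) := by
  induction l generalizing fb with
  | nil => cases fb <;> simp [pvBLoop, pvALoop1, pvALoop2]
  | cons p rest ih =>
    obtain ⟨k, a⟩ := p
    simp only [pvBLoop, pvALoop1, pvALoop2]
    by_cases hempty : PySem.Str.strip (PySem.Dict.getD (PySem.Dict.mk a) "href" "") = ""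
    · rw [if_pos hempty, if_pos hempty, hempty, ih, if_neg (by decide)]
    · rw [if_neg hempty, if_neg hempty]
      generalize (PySem.Str.endswith (PySem.Str.strip (PySem.Dict.getD (PySem.Dict.mk a) "href" "")) ".csv" || PySem.Str.endswith (PySem.Str.strip (PySem.Dict.getD (PySem.Dict.mk a) "href" "")) ".parquet") = d
      generalize PySem.Str.isIn "historical" (PySem.Str.strip (PySem.Dict.getD (PySem.Dict.mk a) "href" "")) = hist
      cases d <;> cases hist <;> cases fb <;> simp [ih]

-- ===== VERDICT (by name: the statement is the Claim_ definition above) =====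
theorem pick_hourly_historical_asset_spec : Claim_equal_pick_hourly_historical_asset := by
  intro assets _
  unfold Spec_pick_hourly_historical_asset pick_hourly_historical_asset pick_hourly_historical_asset_alt
  rw [pvBLoop_eq]
  cases pvALoop1 assets <;> simp
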